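-- pv_equiv track=rewrite | github.com/jakespencer6596-debug/arbitrageiq | backend/src/engines/arb_engine.py | _is_tradeable
-- ===== SOURCE A (Python) =====
-- TRADEABLE_SOURCES = frozenset({
--     "polymarket", "kalshi", "predictit", "smarkets", "sxbet",
--     "betfair", "matchbook", "cloudbet", "opinion",
--     # Odds API sportsbooks
--     "draftkings", "fanduel", "betmgm", "caesars", "pointsbet",
--     "betrivers", "bovada", "bet365", "pinnacle",
--     # Odds API IO bookmakers
--     "odds_api", "odds_api_io",
-- })
--
-- def _is_tradeable(source: str) -> bool:
--     """Check if a source is a real-money tradeable platform."""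
--     src = source.lower().strip()
--     if src in TRADEABLE_SOURCES:
--         return True
--     # Check substring match for sportsbook variants like "draftkings_h2h"
--     for t in TRADEABLE_SOURCES:
--         if t in src:
--             return True
--     return False
-- ===== SOURCE B (Python) =====
-- TRADEABLE_SOURCES = frozenset({
--     "polymarket", "kalshi", "predictit", "smarkets", "sxbet",
--     "betfair", "matchbook", "cloudbet", "opinion",
--     # Odds API sportsbooks
--     "draftkings", "fanduel", "betmgm", "caesars", "pointsbet",
--     "betrivers", "bovada", "bet365", "pinnacle",
--     # Odds API IO bookmakers
--     "odds_api", "odds_api_io",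
-- })
--
-- # Every window length that could hold a token (5..11 here).
-- _WINDOW_LENGTHS = sorted({len(t) for t in TRADEABLE_SOURCES})
--
--
-- def _is_tradeable(source: str) -> bool:
--     """Check if a source is a real-money tradeable platform."""
--     src = source.lower().strip()
--     # Sliding-window search: slide windows of each candidate length over the
--     # string and hash-look each window up in the token set, instead of running
--     # one substring scan per token.
--     return any(src[i:i + n] in TRADEABLE_SOURCES
--                for i in range(len(src))
--                for n in _WINDOW_LENGTHS)
-- ===== Notes on version B (the rewrite author's own statement) =====
-- stated objective: alternative
-- what changed: Replaces A's exact-membership fast path plus one substring scan per token by a sliding-window search: every window of a candidate token length is hash-looked-up in the frozenset, so the set is used as a hash index over windows and the per-token scans disappear.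
import Mathlib
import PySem

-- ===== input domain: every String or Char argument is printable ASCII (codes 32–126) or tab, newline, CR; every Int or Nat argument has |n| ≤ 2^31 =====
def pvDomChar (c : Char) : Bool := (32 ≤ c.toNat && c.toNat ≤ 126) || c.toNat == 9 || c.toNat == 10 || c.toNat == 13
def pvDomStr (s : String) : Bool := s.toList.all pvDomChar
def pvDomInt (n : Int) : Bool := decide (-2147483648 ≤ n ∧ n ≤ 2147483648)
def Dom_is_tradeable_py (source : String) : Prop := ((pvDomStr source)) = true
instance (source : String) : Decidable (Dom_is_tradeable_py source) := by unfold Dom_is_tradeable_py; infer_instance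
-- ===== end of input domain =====

-- B replaces A's exact-membership fast path plus per-token substring scans by a sliding-window
-- search that looks every window of a candidate token length up in the token set (alternative).


-- ===== PORT A =====
-- TRADEABLE_SOURCES (module constant shared by both Pythons), in the set literal's written
-- order; both programs only use it through order-independent queries, so a distinct list is exact.
def pvTradeable : List String :=
  ["polymarket", "kalshi", "predictit", "smarkets", "sxbet",
   "betfair", "matchbook", "cloudbet", "opinion",
   "draftkings", "fanduel", "betmgm", "caesars", "pointsbet",
   "betrivers", "bovada", "bet365", "pinnacle",
   "odds_api", "odds_api_io"]

def is_tradeable_py (source : String) : Bool :=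
  let src := PySem.Str.strip (PySem.Str.lower source)
  if pvTradeable.contains src then true
  else pvTradeable.any (fun t => PySem.Chars.isIn t.toList src.toList)

-- ===== PORT B =====
-- _WINDOW_LENGTHS = sorted({len(t) for t in TRADEABLE_SOURCES})
def pvWindowLens : List Nat := [5, 6, 7, 8, 9, 10, 11]

def is_tradeable_py_alt (source : String) : Bool :=
  let src := (PySem.Str.strip (PySem.Str.lower source)).toList
  -- src[i:i+n] for 0 ≤ i < len(src), n ≥ 0 is exactly (src.drop i).take n
  -- (Python's end-of-string clamping = take's clamping)
  (List.range src.length).any (fun i =>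
    pvWindowLens.any (fun n => pvTradeable.contains (String.ofList ((src.drop i).take n))))

-- ===== PRECONDITION & SPEC =====
def Spec_is_tradeable_py (source : String) (out : Bool) : Prop := out = is_tradeable_py_alt source
instance (source : String) (out : Bool) : Decidable (Spec_is_tradeable_py source out) := by unfold Spec_is_tradeable_py; infer_instance

-- ===== CLAIM (what is proved, stated in full; the proofs are below) =====
def Claim_equal_is_tradeable_py : Prop := ∀ (source : String), Dom_is_tradeable_py source → Spec_is_tradeable_py source (is_tradeable_py source)

-- ===== LEMMAS AND PROOFS =====

-- every token is nonempty and its length is a window length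
theorem pv_tokens_lens : ∀ t ∈ pvTradeable, t.toList ≠ [] ∧ t.toList.length ∈ pvWindowLens := by
  decide

-- A collapses to 'some token is a substring' (an exact match is a substring of itself)
theorem pv_A_eq_any (source : String) :
    is_tradeable_py source =
      pvTradeable.any (fun t =>
        PySem.Chars.isIn t.toList (PySem.Str.strip (PySem.Str.lower source)).toList) := by
  simp only [is_tradeable_py]
  split
  · rename_i h
    rw [List.contains_iff_mem] at h
    refine Eq.symm (List.any_eq_true.mpr ⟨_, h, ?_⟩)
    exact (PySem.Chars.isIn_iff_infix _ _).mpr (List.infix_refl _)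
  · rfl

-- a nonempty list is an infix iff it is the length-sized window at some position i < length
theorem pv_infix_iff_window (t cs : List Char) (ht : t ≠ []) :
    t <:+: cs ↔ ∃ i < cs.length, (cs.drop i).take t.length = t := by
  constructor
  · rintro ⟨p, s, rfl⟩
    refine ⟨p.length, ?_, ?_⟩
    · simp only [List.length_append]
      cases t with
      | nil => exact absurd rfl ht
      | cons a l => simp; omega
    · rw [List.append_assoc, List.drop_left, List.take_append_of_le_length le_rfl,
        List.take_length]
  · rintro ⟨i, _, h⟩
    have h1 : t <+: cs.drop i := h ▸ List.take_prefix _ _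
    exact h1.isInfix.trans (List.drop_suffix i cs).isInfix

theorem is_tradeable_py_spec' (source : String) :
    is_tradeable_py source = is_tradeable_py_alt source := by
  rw [pv_A_eq_any]
  unfold is_tradeable_py_alt
  set cs := (PySem.Str.strip (PySem.Str.lower source)).toList with hcs
  rw [Bool.eq_iff_iff]
  simp only [List.any_eq_true, List.mem_range, PySem.Chars.isIn_iff_infix,
    List.contains_iff_mem]
  constructor
  · rintro ⟨t, ht, hinf⟩
    obtain ⟨hne, hlen⟩ := pv_tokens_lens t ht
    obtain ⟨i, hi, hwin⟩ := (pv_infix_iff_window t.toList cs hne).mp hinf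
    refine ⟨i, hi, t.toList.length, hlen, ?_⟩
    rw [hwin]
    simpa using ht
  · rintro ⟨i, _, n, _, hm⟩
    refine ⟨String.ofList ((cs.drop i).take n), hm, ?_⟩
    have h1 : ((cs.drop i).take n) <+: cs.drop i := List.take_prefix _ _
    simpa using h1.isInfix.trans (List.drop_suffix i cs).isInfix

-- ===== VERDICT (by name: the statement is the Claim_ definition above) =====
theorem is_tradeable_py_spec : Claim_equal_is_tradeable_py := by
  intro source _
  exact is_tradeable_py_spec' source
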